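-- pv_equiv track=rewrite | github.com/ohzeno/Algo | Programmers/Previous_KAKAO/Lv.1/신고 결과 받기.py | solution
-- ===== SOURCE A (Python) =====
-- def solution(id_list, report, k):
--     user_d = {
--         user: {
--             'mailed': 0, 'reported_by': []
--         } for user in id_list
--     }
--     for r in set(report):
--         reporter, reported = r.split()
--         user_d[reported]['reported_by'].append(reporter)
--     for user in user_d.values():
--         if len(user['reported_by']) >= k:
--             for reporter in user['reported_by']:
--                 user_d[reporter]['mailed'] += 1
--     return [user['mailed'] for user in user_d.values()]
-- ===== SOURCE B (Python) =====
-- def solution(id_list, report, k):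
--     cnt = {}
--     targets = {}
--     for r in set(report):
--         reporter, reported = r.split()
--         cnt[reported] = cnt.get(reported, 0) + 1
--         targets.setdefault(reporter, []).append(reported)
--     return [sum(1 for t in targets.get(i, []) if cnt.get(t, 0) >= k) for i in id_list]
-- ===== Notes on version B (the rewrite author's own statement) =====
-- stated objective: alternative
-- what changed: Instead of one combined per-user dict that first collects each victim's reporter list and then distributes +1 mail to each reporter of an over-threshold victim, B builds two separate maps in one pass over set(report) (a per-victim distinct-report counter and a reporter->targets adjacency list) and computes each answer directly by counting that reporter's own targets whose report count reaches k, transposing the nested distribution loop.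
-- outside the precondition, e.g. on solution(['a', 'a'], [], 1): A returns [0], B returns [0, 0]
import Mathlib
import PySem

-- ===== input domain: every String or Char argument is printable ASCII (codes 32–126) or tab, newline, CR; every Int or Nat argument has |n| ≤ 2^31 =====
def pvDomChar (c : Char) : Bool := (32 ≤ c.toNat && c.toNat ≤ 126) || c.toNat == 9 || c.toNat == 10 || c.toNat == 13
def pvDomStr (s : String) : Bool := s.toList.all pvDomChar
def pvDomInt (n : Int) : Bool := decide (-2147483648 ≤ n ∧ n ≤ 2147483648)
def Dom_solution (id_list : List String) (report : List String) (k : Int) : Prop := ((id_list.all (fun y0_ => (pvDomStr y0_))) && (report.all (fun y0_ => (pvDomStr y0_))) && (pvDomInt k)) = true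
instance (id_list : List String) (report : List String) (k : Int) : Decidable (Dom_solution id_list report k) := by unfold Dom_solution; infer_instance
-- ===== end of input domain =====

-- B replaces A's single combined per-user dict (collect reporter lists, then distribute mails
-- to reporters of over-threshold victims) by two separate maps built in one pass over set(report)
-- — a per-victim report counter and a reporter→targets adjacency — and reads each answer off
-- directly per reporter; objective: alternative decomposition (transposed loop), same cost.

-- ===== PORT A =====
-- A's inner per-user dict {'mailed': …, 'reported_by': …} is modelled as the pair (Int × List String).
-- Python raises KeyError when a report names a user outside id_list; Dict.modify inserts instead —
-- those inputs are excluded by Pre_solution.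
def pvStepA1 (d : PySem.Dict String (Int × List String)) (r : String) :
    PySem.Dict String (Int × List String) :=
  match PySem.Str.split₀ r with
  | [reporter, reported] => d.modify reported (0, []) (fun p => (p.1, p.2 ++ [reporter]))
  | _ => d  -- Python raises ValueError on unpacking here; excluded by Pre_solution

def pvStepA2 (d : PySem.Dict String (Int × List String)) (rep : String) :
    PySem.Dict String (Int × List String) :=
  d.modify rep (0, []) (fun p => (p.1 + 1, p.2))

def solution (id_list : List String) (report : List String) (k : Int) : List Int :=
  let d0 := id_list.foldl (fun d u => d.insert u ((0 : Int), ([] : List String))) PySem.Dict.empty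
  let d1 := (PySem.Set.ofList report).foldl pvStepA1 d0
  -- second loop: iterates the users in dict order; 'reported_by' is never modified in this
  -- phase, so it is read from d1
  let d2 := d1.keys.foldl (fun d u =>
      let rb := (d1.getD u (0, [])).2
      if k ≤ (rb.length : Int) then rb.foldl pvStepA2 d else d) d1
  d2.values.map (·.1)

-- ===== PORT B =====
def pvStepB (st : PySem.Dict String Int × PySem.Dict String (List String)) (r : String) :
    PySem.Dict String Int × PySem.Dict String (List String) :=
  match PySem.Str.split₀ r with
  | [reporter, reported] =>
      (st.1.modify reported 0 (· + 1), st.2.modify reporter [] (· ++ [reported]))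
  | _ => st  -- Python raises ValueError on unpacking here; excluded by Pre_solution

def solution_alt (id_list : List String) (report : List String) (k : Int) : List Int :=
  let st := (PySem.Set.ofList report).foldl pvStepB (PySem.Dict.empty, PySem.Dict.empty)
  id_list.map (fun i =>
    (((st.2.getD i []).filter (fun t => k ≤ st.1.getD t 0)).length : Int))

-- ===== PRECONDITION & SPEC =====
-- number of distinct report strings naming b as the victim (= the victim's distinct-report count)
def pvVCnt (report : List String) (b : String) : Nat :=
  ((PySem.Set.ofList report).filter (fun r => (PySem.Str.split₀ r).drop 1 = [b])).length

-- Pre_ excludes exactly (i) inputs on which A raises — a report that does not split into two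
-- words (ValueError on unpacking), a victim outside id_list (KeyError), or a reporter outside
-- id_list whose victim gathers at least k distinct reports (KeyError while distributing mail) —
-- and (ii) duplicate ids in id_list, a dict-duplicate-key corner: A's dict comprehension
-- collapses duplicates, so A returns one entry per distinct id while B naturally answers per
-- element of id_list (see the cite).
def Pre_solution (id_list : List String) (report : List String) (k : Int) : Prop :=
  id_list.Nodup ∧ ∀ r ∈ report,
    (PySem.Str.split₀ r).length = 2 ∧
    (PySem.Str.split₀ r).getD 1 "" ∈ id_list ∧
    ((PySem.Str.split₀ r).getD 0 "" ∈ id_list ∨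
      ((pvVCnt report ((PySem.Str.split₀ r).getD 1 "") : Int) < k))
instance (id_list : List String) (report : List String) (k : Int) :
    Decidable (Pre_solution id_list report k) := by unfold Pre_solution; infer_instance

def pvWitness_solution : List String × List String × Int :=
  (["muzi", "frodo", "apeach"], ["muzi frodo", "apeach frodo", "muzi apeach"], 2)

def Spec_solution (id_list : List String) (report : List String) (k : Int) (out : List Int) : Prop := out = solution_alt id_list report k
instance (id_list : List String) (report : List String) (k : Int) (out : List Int) : Decidable (Spec_solution id_list report k out) := by unfold Spec_solution; infer_instance

-- ===== CLAIM (what is proved, stated in full; the proofs are below) =====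
def Claim_equal_solution : Prop := ∀ (id_list : List String) (report : List String) (k : Int), Dom_solution id_list report k → Pre_solution id_list report k → Spec_solution id_list report k (solution id_list report k)


-- ===== LEMMAS AND PROOFS =====

-- the (reporter, reported) pairs of the distinct report strings
def pvPairs (S : List String) : List (String × String) :=
  S.filterMap (fun r => match PySem.Str.split₀ r with | [a, b] => some (a, b) | _ => none)

-- the reporters of user u
def pvRb (S : List String) (u : String) : List String :=
  ((pvPairs S).filter (fun p => p.2 == u)).map (·.1)

-- what Pre_ gives about each distinct report: two words, the victim is a listed user, and the
-- reporter is listed unless the victim stays below the threshold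
def pvGood (ids : List String) (report : List String) (k : Int) (S : List String) : Prop :=
  ∀ r ∈ S, ∃ a b, PySem.Str.split₀ r = [a, b] ∧ b ∈ ids ∧
    (a ∈ ids ∨ ((pvVCnt report b : Int) < k))

theorem pvGood_of_pre {ids report : List String} {k : Int}
    (h : ∀ r ∈ report,
      (PySem.Str.split₀ r).length = 2 ∧
      (PySem.Str.split₀ r).getD 1 "" ∈ ids ∧
      ((PySem.Str.split₀ r).getD 0 "" ∈ ids ∨
        ((pvVCnt report ((PySem.Str.split₀ r).getD 1 "") : Int) < k))) :
    pvGood ids report k (PySem.Set.ofList report) := by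
  intro r hr
  obtain ⟨h2, hb, ha⟩ := h r ((PySem.Set.mem_ofList report r).mp hr)
  match hs : PySem.Str.split₀ r with
  | [a, b] =>
      rw [hs] at hb ha
      exact ⟨a, b, rfl, hb, ha⟩
  | [] => rw [hs] at h2; simp at h2
  | [a] => rw [hs] at h2; simp at h2
  | a :: b :: c :: l => rw [hs] at h2; simp at h2

theorem pvGood_cons {ids report r} {k : Int} {S : List String}
    (h : pvGood ids report k (r :: S)) :
    (∃ a b, PySem.Str.split₀ r = [a, b] ∧ b ∈ ids ∧ (a ∈ ids ∨ ((pvVCnt report b : Int) < k)))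
      ∧ pvGood ids report k S :=
  ⟨h r (List.mem_cons_self ..), fun x hx => h x (List.mem_cons_of_mem _ hx)⟩

theorem pvPairs_cons_good {r : String} {a b : String} (S : List String)
    (hs : PySem.Str.split₀ r = [a, b]) :
    pvPairs (r :: S) = (a, b) :: pvPairs S := by
  simp [pvPairs, hs]

theorem pvRb_cons {r a b : String} (S : List String) (u : String)
    (hs : PySem.Str.split₀ r = [a, b]) :
    pvRb (r :: S) u = if b = u then a :: pvRb S u else pvRb S u := by
  simp only [pvRb, pvPairs_cons_good S hs, List.filter_cons]
  by_cases hbu : b = u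
  · simp [hbu]
  · simp [hbu]

-- the distinct-report count of a victim IS the length of its reporter list
theorem pvRb_length_eq_vcnt (S : List String) (b : String)
    (h2 : ∀ r ∈ S, (PySem.Str.split₀ r).length = 2) :
    (pvRb S b).length = (S.filter (fun r => (PySem.Str.split₀ r).drop 1 = [b])).length := by
  induction S with
  | nil => simp [pvRb, pvPairs]
  | cons r S ih =>
      have hr2 := h2 r (List.mem_cons_self ..)
      obtain ⟨a, b', hs⟩ : ∃ a b', PySem.Str.split₀ r = [a, b'] := by
        match hsp : PySem.Str.split₀ r with
        | [a, b'] => exact ⟨a, b', rfl⟩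
        | [] => rw [hsp] at hr2; simp at hr2
        | [a] => rw [hsp] at hr2; simp at hr2
        | a :: b' :: c :: l => rw [hsp] at hr2; simp at hr2
      have ihS := ih (fun x hx => h2 x (List.mem_cons_of_mem _ hx))
      rw [pvRb_cons S b hs, List.filter_cons]
      by_cases hb : b' = b
      · subst hb; simp [hs, ihS]
      · have : ((PySem.Str.split₀ r).drop 1 = [b]) = False := by
          simp [hs, hb]
        simp [hs, hb, ihS]

-- === A side ===

theorem pv_d0_getD (ids : List String) :
    ∀ d : PySem.Dict String (Int × List String), (∀ u, d.getD u (0, []) = (0, [])) →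
      ∀ u, (ids.foldl (fun d u => d.insert u ((0 : Int), ([] : List String))) d).getD u (0, []) = (0, []) := by
  induction ids with
  | nil => intro d h u; exact h u
  | cons x ids ih =>
      intro d h u
      refine ih _ (fun v => ?_) u
      rw [PySem.Dict.getD_insert]
      split <;> [rfl; exact h v]

theorem pv_d0_keys (ids : List String) (h : ids.Nodup) :
    (ids.foldl (fun d u => d.insert u ((0 : Int), ([] : List String))) PySem.Dict.empty).keys = ids := by
  rw [PySem.Dict.keys_foldl_insert (f := fun _ _ => ((0 : Int), ([] : List String)))]
  show PySem.Set.update (PySem.Dict.empty (κ := String) (ν := Int × List String)).keys ids = ids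
  rw [PySem.Dict.keys_empty]
  rw [show PySem.Set.update ([] : List String) ids = PySem.Set.ofList ids from
        (PySem.Set.ofList_eq_foldl ids).symm]
  exact PySem.Set.ofList_eq_self_of_nodup ids h

theorem pv_fold1 (ids report : List String) (k : Int) (S : List String) :
    ∀ (d : PySem.Dict String (Int × List String)), pvGood ids report k S → d.keys = ids →
      (S.foldl pvStepA1 d).keys = ids ∧
      ∀ u, (S.foldl pvStepA1 d).getD u (0, []) =
        ((d.getD u (0, [])).1, (d.getD u (0, [])).2 ++ pvRb S u) := by
  induction S with
  | nil => intro d _ hk; exact ⟨hk, fun u => by simp [pvRb, pvPairs]⟩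
  | cons r S ih =>
      intro d hg hk
      obtain ⟨⟨a, b, hs, hb, _⟩, hgS⟩ := pvGood_cons hg
      have hstep : pvStepA1 d r = d.modify b (0, []) (fun p => (p.1, p.2 ++ [a])) := by
        simp [pvStepA1, hs]
      have hkeys : (pvStepA1 d r).keys = ids := by
        rw [hstep, PySem.Dict.keys_modify, PySem.Dict.keys_insert_of_contains, hk]
        rw [PySem.Dict.contains_iff_mem_keys, hk]; exact hb
      have := ih (pvStepA1 d r) hgS hkeys
      refine ⟨by simpa using this.1, fun u => ?_⟩
      rw [List.foldl_cons, this.2 u, hstep, PySem.Dict.getD_modify, pvRb_cons S u hs]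
      by_cases hub : u = b
      · subst hub; simp
      · simp [hub, Ne.symm hub]

theorem pv_fold2 (ids : List String) (L : List String) :
    ∀ (d : PySem.Dict String (Int × List String)),
      (∀ x ∈ L, x ∈ ids) → d.keys = ids →
      (L.foldl pvStepA2 d).keys = ids ∧
      ∀ u, (L.foldl pvStepA2 d).getD u (0, []) =
        ((d.getD u (0, [])).1 + (L.count u : Int), (d.getD u (0, [])).2) := by
  induction L with
  | nil => intro d _ hk; exact ⟨hk, fun u => by simp⟩
  | cons x L ih =>
      intro d hm hk
      have hkeys : (pvStepA2 d x).keys = ids := by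
        rw [pvStepA2, PySem.Dict.keys_modify, PySem.Dict.keys_insert_of_contains, hk]
        rw [PySem.Dict.contains_iff_mem_keys, hk]; exact hm x (by simp)
      have := ih (pvStepA2 d x) (fun y hy => hm y (List.mem_cons_of_mem _ hy)) hkeys
      refine ⟨by simpa using this.1, fun u => ?_⟩
      rw [List.foldl_cons, this.2 u, pvStepA2, PySem.Dict.getD_modify]
      by_cases hux : u = x
      · subst hux; simp [List.count_cons_self]; ring
      · simp [hux, Ne.symm hux]

theorem pv_fold3 (ids : List String) (g : String → List String) (k : Int) (vs : List String) :
    ∀ (d : PySem.Dict String (Int × List String)),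
      (∀ v ∈ vs, k ≤ ((g v).length : Int) → ∀ x ∈ g v, x ∈ ids) → d.keys = ids →
      (vs.foldl (fun d v => if k ≤ ((g v).length : Int) then (g v).foldl pvStepA2 d else d) d).keys = ids ∧
      ∀ u, (vs.foldl (fun d v => if k ≤ ((g v).length : Int) then (g v).foldl pvStepA2 d else d) d).getD u (0, []) =
        ((d.getD u (0, [])).1 +
          (vs.map (fun v => if k ≤ ((g v).length : Int) then ((g v).count u : Int) else 0)).sum,
         (d.getD u (0, [])).2) := by
  induction vs with
  | nil => intro d _ hk; exact ⟨hk, fun u => by simp⟩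
  | cons v vs ih =>
      intro d hm hk
      by_cases hc : k ≤ ((g v).length : Int)
      · have h2 := pv_fold2 ids (g v) d (hm v (by simp) hc) hk
        have := ih ((g v).foldl pvStepA2 d) (fun w hw => hm w (List.mem_cons_of_mem _ hw)) h2.1
        refine ⟨by simpa [hc] using this.1, fun u => ?_⟩
        rw [List.foldl_cons]
        simp only [if_pos hc]
        rw [this.2 u, h2.2 u]
        simp [hc]; ring
      · have := ih d (fun w hw => hm w (List.mem_cons_of_mem _ hw)) hk
        refine ⟨by simpa [hc] using this.1, fun u => ?_⟩
        rw [List.foldl_cons]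
        simp only [if_neg hc]
        rw [this.2 u]
        simp [hc]

-- === B side ===

theorem pv_foldB (S : List String) :
    ∀ (st : PySem.Dict String Int × PySem.Dict String (List String)),
      (∀ r ∈ S, (PySem.Str.split₀ r).length = 2) →
      (∀ t, (S.foldl pvStepB st).1.getD t 0 =
          st.1.getD t 0 + (((pvPairs S).map (·.2)).count t : Int)) ∧
      (∀ i, (S.foldl pvStepB st).2.getD i [] =
          st.2.getD i [] ++ ((pvPairs S).filter (fun p => p.1 == i)).map (·.2)) := by
  induction S with
  | nil => intro st _; exact ⟨fun t => by simp [pvPairs], fun i => by simp [pvPairs]⟩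
  | cons r S ih =>
      intro st hg
      have h2 := hg r (List.mem_cons_self ..)
      obtain ⟨a, b, hs⟩ : ∃ a b, PySem.Str.split₀ r = [a, b] := by
        match hsp : PySem.Str.split₀ r with
        | [a, b] => exact ⟨a, b, rfl⟩
        | [] => rw [hsp] at h2; simp at h2
        | [a] => rw [hsp] at h2; simp at h2
        | a :: b :: c :: l => rw [hsp] at h2; simp at h2
      have hstep : pvStepB st r =
          (st.1.modify b 0 (· + 1), st.2.modify a [] (· ++ [b])) := by
        simp [pvStepB, hs]
      have := ih (pvStepB st r) (fun x hx => hg x (List.mem_cons_of_mem _ hx))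
      rw [pvPairs_cons_good S hs]
      refine ⟨fun t => ?_, fun i => ?_⟩
      · rw [List.foldl_cons, this.1 t, hstep]
        simp only [PySem.Dict.getD_modify]
        by_cases htb : t = b
        · subst htb; simp [List.count_cons_self]; ring
        · simp [htb, Ne.symm htb]
      · rw [List.foldl_cons, this.2 i, hstep]
        simp only [PySem.Dict.getD_modify]
        by_cases hia : i = a
        · subst hia; simp [List.append_assoc]
        · simp [hia, Ne.symm hia]

-- === the transposition (double counting) ===

theorem pv_sum_indicator (t : String) (b : Bool) :
    ∀ vs : List String,
      (vs.map (fun v => if b && (t == v) then (1 : Int) else 0)).sum =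
        if b then (vs.count t : Int) else 0 := by
  intro vs
  induction vs with
  | nil => cases b <;> simp
  | cons v vs ih =>
      rw [List.map_cons, List.sum_cons, ih]
      by_cases hb : b = true
      · subst hb
        by_cases htv : t = v
        · subst htv; simp [List.count_cons_self]; ring
        · simp [htv, Ne.symm htv]
      · simp at hb; subst hb; simp

theorem pv_bridge (u : String) (C : String → Bool) (vs : List String)
    (hnd : vs.Nodup) :
    ∀ L : List (String × String), (∀ p ∈ L, p.2 ∈ vs) →
      (vs.map (fun v => if C v then ((L.countP (fun q => q.1 == u && q.2 == v)) : Int) else 0)).sum =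
        ((L.countP (fun p => p.1 == u && C p.2)) : Int) := by
  intro L
  induction L with
  | nil => intro _; simp
  | cons p L ih =>
      intro hm
      have hml : ∀ q ∈ L, q.2 ∈ vs := fun q hq => hm q (List.mem_cons_of_mem _ hq)
      have hp2 : p.2 ∈ vs := hm p (List.mem_cons_self ..)
      have hsplit :
          (vs.map (fun v => if C v then ((List.countP (fun q => q.1 == u && q.2 == v) (p :: L)) : Int) else 0)).sum =
          (vs.map (fun v => if C v then ((L.countP (fun q => q.1 == u && q.2 == v)) : Int) else 0)).sum +
          (vs.map (fun v => if (p.1 == u && C p.2) && (p.2 == v) then (1 : Int) else 0)).sum := by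
        rw [← List.sum_map_add]
        congr 1
        apply List.map_congr_left
        intro v _
        rw [List.countP_cons]
        by_cases hcv : C v = true
        · by_cases hpv : p.2 = v
          · subst hpv
            rw [show C p.2 = true from hcv]
            by_cases hpu : p.1 = u <;> simp [hpu]
          · have : (p.2 == v) = false := by simp [hpv]
            simp [hcv, this]
        · simp only [Bool.not_eq_true] at hcv
          have : (p.2 == v) → C p.2 = false := by
            intro h; rwa [show p.2 = v from by simpa using h]
          by_cases hpv : p.2 = v
          · simp [hcv, hpv ▸ hcv]
          · have : (p.2 == v) = false := by simp [hpv]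
            simp [hcv, this]
      rw [hsplit, ih hml, pv_sum_indicator p.2 (p.1 == u && C p.2) vs]
      rw [List.countP_cons]
      by_cases hq : (p.1 == u && C p.2) = true
      · rw [List.count_eq_one_of_mem hnd hp2]
        simp [hq]
      · simp only [Bool.not_eq_true] at hq
        simp [hq]

-- count of reporters of u equals a countP over the pairs
theorem pv_rb_count (S : List String) (u v : String) :
    (pvRb S v).count u = (pvPairs S).countP (fun q => q.1 == u && q.2 == v) := by
  rw [pvRb, List.count_eq_countP, List.countP_map, List.countP_filter]
  apply List.countP_congr
  intro q _
  simp [Function.comp]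

theorem pv_rb_length (S : List String) (v : String) :
    (pvRb S v).length = ((pvPairs S).map (·.2)).count v := by
  rw [pvRb, List.length_map, List.count_eq_countP, List.countP_map,
      ← List.countP_eq_length_filter]
  apply List.countP_congr
  intro q _
  simp [Function.comp]

-- every pair's victim is a listed user
theorem pv_pairs_mem (ids report : List String) (k : Int) (S : List String)
    (hg : pvGood ids report k S) :
    ∀ p ∈ pvPairs S, p.2 ∈ ids := by
  intro p hp
  simp only [pvPairs, List.mem_filterMap] at hp
  obtain ⟨r, hr, hm⟩ := hp
  obtain ⟨a, b, hs, hb, _⟩ := hg r hr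
  rw [hs] at hm
  simp only [Option.some.injEq] at hm
  subst hm
  exact hb

-- a reporter of an over-threshold victim is a listed user
theorem pv_reporter_mem (ids report : List String) (k : Int) (v : String)
    (hg : pvGood ids report k (PySem.Set.ofList report))
    (hk : k ≤ ((pvRb (PySem.Set.ofList report) v).length : Int)) :
    ∀ x ∈ pvRb (PySem.Set.ofList report) v, x ∈ ids := by
  intro x hx
  simp only [pvRb, List.mem_map, List.mem_filter] at hx
  obtain ⟨q, ⟨hq, hqv⟩, rfl⟩ := hx
  simp only [pvPairs, List.mem_filterMap] at hq
  obtain ⟨r, hr, hm⟩ := hq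
  obtain ⟨a, b, hs, _, ha⟩ := hg r hr
  rw [hs] at hm
  simp only [Option.some.injEq] at hm
  subst hm
  have hbv : b = v := by simpa using hqv
  subst hbv
  rcases ha with ha | ha
  · exact ha
  · exfalso
    have h2 : ∀ r ∈ PySem.Set.ofList report, (PySem.Str.split₀ r).length = 2 := by
      intro r' hr'
      obtain ⟨a', b', hs', _, _⟩ := hg r' hr'
      simp [hs']
    have := pvRb_length_eq_vcnt (PySem.Set.ofList report) b h2
    rw [this] at hk
    exact absurd hk (by rw [pvVCnt] at ha; omega)

-- ===== VERDICT (by name: the statement is the Claim_ definition above) =====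
theorem solution_spec : Claim_equal_solution := by
  intro ids report k _ hpre
  obtain ⟨hnd, hrep⟩ := hpre
  unfold Spec_solution solution solution_alt
  dsimp only
  have hgood : pvGood ids report k (PySem.Set.ofList report) := pvGood_of_pre hrep
  set S : List String := PySem.Set.ofList report with hS
  have h2all : ∀ r ∈ S, (PySem.Str.split₀ r).length = 2 := by
    intro r hr
    obtain ⟨a, b, hs, _, _⟩ := hgood r hr
    simp [hs]
  -- A side
  have hd0k := pv_d0_keys ids hnd
  have hd0g := pv_d0_getD ids PySem.Dict.empty (fun u => PySem.Dict.getD_empty u (0, []))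
  have h1 := pv_fold1 ids report k S _ hgood hd0k
  set d1 : PySem.Dict String (Int × List String) := S.foldl pvStepA1
      (ids.foldl (fun d u => d.insert u ((0 : Int), ([] : List String))) PySem.Dict.empty) with hd1
  have hk1 : d1.keys = ids := h1.1
  have hd1g : ∀ u, d1.getD u (0, []) = (0, pvRb S u) := by
    intro u; rw [h1.2 u, hd0g u]; simp
  rw [hk1]
  have hmem_rb : ∀ v ∈ ids, k ≤ (((d1.getD v (0, [])).2).length : Int) →
      ∀ x ∈ (d1.getD v (0, [])).2, x ∈ ids := by
    intro v _ hkv x hx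
    rw [hd1g v] at hkv hx
    exact pv_reporter_mem ids report k v hgood hkv x hx
  have h3 := pv_fold3 ids (fun v => (d1.getD v (0, [])).2) k ids d1 hmem_rb hk1
  set d2 : PySem.Dict String (Int × List String) :=
      ids.foldl (fun d v =>
        if k ≤ (((d1.getD v (0, [])).2).length : Int)
        then ((d1.getD v (0, [])).2).foldl pvStepA2 d else d) d1 with hd2
  rw [PySem.Dict.values_eq_map_keys d2 (by rw [h3.1]; exact hnd) (0, []), List.map_map, h3.1]
  -- B side
  have hB := pv_foldB S (PySem.Dict.empty, PySem.Dict.empty) h2all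
  set st := S.foldl pvStepB (PySem.Dict.empty, PySem.Dict.empty) with hst
  have hcnt : ∀ t, st.1.getD t 0 = (((pvPairs S).map (·.2)).count t : Int) := by
    intro t; rw [hB.1 t]; simp
  have htar : ∀ i, st.2.getD i [] = ((pvPairs S).filter (fun p => p.1 == i)).map (·.2) := by
    intro i; rw [hB.2 i]; simp
  apply List.map_congr_left
  intro u _
  show ((d2.getD u (0, [])).1 : Int) = _
  rw [h3.2 u, hd1g u]
  rw [htar u]
  -- turn B's value into a countP over pvPairs S
  have hBval :
      ((((pvPairs S).filter (fun p => p.1 == u)).map (·.2)).filter (fun t => k ≤ st.1.getD t 0)).length =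
        (pvPairs S).countP (fun p => p.1 == u && decide (k ≤ ((((pvPairs S).map (·.2)).count p.2 : Nat) : Int))) := by
    rw [← List.countP_eq_length_filter, List.countP_map, List.countP_filter]
    apply List.countP_congr
    intro q _
    simp [Function.comp, hcnt q.2, Bool.and_comm]
  rw [hBval]
  -- bridge
  have hbr := pv_bridge u (fun v => decide (k ≤ ((((pvPairs S).map (·.2)).count v : Nat) : Int))) ids hnd
      (pvPairs S) (fun p hp => pv_pairs_mem ids report k S hgood p hp)
  rw [← hbr]
  rw [zero_add]
  dsimp only
  congr 1
  apply List.map_congr_left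
  intro v _
  simp only [hd1g]
  show (if k ≤ ((pvRb S v).length : Int) then ((pvRb S v).count u : Int) else 0) = _
  rw [pv_rb_count S u v, pv_rb_length S v]
  simp
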